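-- pv_equiv track=rewrite | github.com/kennethchuson/Problem-Sets | TopProblems/NestedPairCombinations.py | solve
-- ===== SOURCE A (Python) =====
-- def solve(n, k):
--     res = []
--     def dfs(start, comb):
--         if len(comb) == k:
--             res.append(comb.copy())
--             return
--         for i in range(start, n + 1):
--             for j in range(start, n + 1):
--                 pair = (i, j)
--                 comb.append(pair)
--                 dfs(i + 1, comb)
--                 comb.pop()
--     dfs(1, [])
--
--     return res
-- ===== SOURCE B (Python) =====
-- def solve(n, k):
--     if k < 0:
--         return []
--     if k == 0:
--         return [[]]
--     # partial states (start, chain); chain is a parent-pointer list: None or (prev, pair)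
--     states = [(1, None)]
--     for depth in range(k - 1):
--         if not states:
--             break
--         hi = n - (k - depth - 1)  # largest i that still leaves room for the remaining pairs
--         states = [(i + 1, (chain, (i, j)))
--                   for start, chain in states
--                   for i in range(start, hi + 1)
--                   for j in range(start, n + 1)]
--     res = []
--     for start, chain in states:
--         comb = []
--         while chain is not None:
--             chain, pair = chain
--             comb.append(pair)
--         comb.reverse()
--         for i in range(start, n + 1):
--             for j in range(start, n + 1):
--                 res.append(comb + [(i, j)])
--     return res
-- ===== Notes on version B (the rewrite author's own statement) =====
-- stated objective: alternative
-- what changed: Replaced A's recursive DFS mutating one shared comb list with an iterative level-by-level expansion of partial states (start, parent-pointer chain) that prunes children with too few indices left to ever reach length k, then emits the final level directly; same output in the same order. Pre_ excludes n>900 with k negative or k>900, where A's DFS dive can raise RecursionError; it excludes no input on which A returns.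
import Mathlib
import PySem

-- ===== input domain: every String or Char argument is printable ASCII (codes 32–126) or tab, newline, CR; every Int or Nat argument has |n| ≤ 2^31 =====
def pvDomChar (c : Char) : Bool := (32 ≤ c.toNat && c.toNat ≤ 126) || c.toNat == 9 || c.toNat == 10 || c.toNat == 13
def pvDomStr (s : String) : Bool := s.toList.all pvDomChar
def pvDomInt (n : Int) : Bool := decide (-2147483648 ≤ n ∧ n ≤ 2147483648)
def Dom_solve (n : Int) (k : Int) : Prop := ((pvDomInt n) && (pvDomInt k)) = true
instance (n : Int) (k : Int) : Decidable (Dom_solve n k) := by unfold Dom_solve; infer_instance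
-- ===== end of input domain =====

-- B replaces A's recursive DFS (mutating one shared list) with an iterative level-by-level
-- expansion of partial states (start, comb); same return value, different decomposition (objective: alternative).

-- ===== PORT A =====
-- dfs(start, comb): returns, in order, the combinations A's dfs appends to res.
-- `.attach` only carries the membership fact needed for termination; the computation is A's.
def solveDfs (n : Int) (k : Int) (start : Int) (comb : List (Int × Int)) :
    List (List (Int × Int)) :=
  if (comb.length : Int) = k then [comb]
  else
    (PySem.List.pyRange start (n + 1) 1).attach.flatMap (fun i =>
      (PySem.List.pyRange start (n + 1) 1).flatMap (fun j =>
        solveDfs n k (i.1 + 1) (comb ++ [(i.1, j)])))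
termination_by (n + 1 - start).toNat
decreasing_by
  have h := (PySem.List.mem_pyRange_one).1 i.2
  omega

def solve (n : Int) (k : Int) : List (List (Int × Int)) :=
  solveDfs n k 1 []

-- ===== PORT B =====
-- parent-pointer chain of pairs: Source B's None / (prev, pair)
inductive PVChain where
  | nil : PVChain
  | cons : PVChain → Int → Int → PVChain
deriving DecidableEq, Repr

-- Source B's unwinding while-loop (top-down pairs), then the reverse
def chainUnwind : PVChain → List (Int × Int)
  | .nil => []
  | .cons c i j => (i, j) :: chainUnwind c

def chainToList (c : PVChain) : List (Int × Int) := (chainUnwind c).reverse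

-- one iteration of Source B's state-building loop (hi caps i so room remains)
def solveStep (n : Int) (hi : Int) (states : List (Int × PVChain)) :
    List (Int × PVChain) :=
  states.flatMap (fun p =>
    (PySem.List.pyRange p.1 (hi + 1) 1).flatMap (fun i =>
      (PySem.List.pyRange p.1 (n + 1) 1).map (fun j => (i + 1, PVChain.cons p.2 i j))))

-- `for depth in range(k-1)` with the early break on empty states;
-- m counts the remaining iterations, so hi = n - (k - depth - 1) = n - (m+1)
def solveLoop (n : Int) : Nat → List (Int × PVChain) → List (Int × PVChain)
  | 0, states => states
  | m + 1, states =>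
    if states = [] then states
    else solveLoop n m (solveStep n (n - (m + 1)) states)

def solve_alt (n : Int) (k : Int) : List (List (Int × Int)) :=
  if k < 0 then []
  else if k = 0 then [[]]
  else
    (solveLoop n (k.toNat - 1) [(1, PVChain.nil)]).flatMap (fun p =>
      (PySem.List.pyRange p.1 (n + 1) 1).flatMap (fun i =>
        (PySem.List.pyRange p.1 (n + 1) 1).map (fun j => chainToList p.2 ++ [(i, j)])))

-- ===== PRECONDITION & SPEC =====
-- Pre_ excludes inputs with n > 900 whose k is negative or also > 900: there A's first DFS dive
-- reaches depth min(n,k)+1 (depth n+1 when k < 0, since len(comb) == k never holds) and can hit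
-- CPython's recursion limit, raising RecursionError; A returns no value on any excluded input
-- (it either raises or never terminates, the enumerated tree being astronomically large).
def Pre_solve (n : Int) (k : Int) : Prop := n ≤ 900 ∨ (0 ≤ k ∧ k ≤ 900)
instance (n : Int) (k : Int) : Decidable (Pre_solve n k) := by unfold Pre_solve; infer_instance
def pvWitness_solve : Int × Int := (3, 2)

def Spec_solve (n : Int) (k : Int) (out : List (List (Int × Int))) : Prop := out = solve_alt n k
instance (n : Int) (k : Int) (out : List (List (Int × Int))) : Decidable (Spec_solve n k out) := by unfold Spec_solve; infer_instance

-- ===== CLAIM (what is proved, stated in full; the proofs are below) =====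
def Claim_equal_solve : Prop := ∀ (n : Int) (k : Int), Dom_solve n k → Pre_solve n k → Spec_solve n k (solve n k)

-- ===== LEMMAS AND PROOFS =====

-- the common denotation: the combinations produced from state (s, c) in exactly m more steps
def solveTree (n : Int) : Nat → Int → List (Int × Int) → List (List (Int × Int))
  | 0, _, c => [c]
  | m + 1, s, c =>
    (PySem.List.pyRange s (n + 1) 1).flatMap (fun i =>
      (PySem.List.pyRange s (n + 1) 1).flatMap (fun j =>
        solveTree n m (i + 1) (c ++ [(i, j)])))

-- A's dfs yields nothing once the partial combination is already longer than k
theorem solveDfs_eq_nil (n k : Int) (start : Int) (comb : List (Int × Int))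
    (h : k < (comb.length : Int)) : solveDfs n k start comb = [] := by
  fun_induction solveDfs n k start comb with
  | case1 s c hc => omega
  | case2 s c hc ih =>
    rw [List.flatMap_eq_nil_iff]
    intro i _
    rw [List.flatMap_eq_nil_iff]
    intro j hj
    exact ih i j (by simp; omega)

-- A's dfs with m = k - len(comb) remaining slots computes solveTree m
theorem solveDfs_eq_tree (n k : Int) (m : Nat) (start : Int) (comb : List (Int × Int))
    (h : (comb.length : Int) + m = k) :
    solveDfs n k start comb = solveTree n m start comb := by
  induction m generalizing start comb with
  | zero =>
    rw [solveDfs]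
    simp only [Nat.cast_zero, add_zero] at h
    simp [h, solveTree]
  | succ m ih =>
    rw [solveDfs]
    have hne : ¬ ((comb.length : Int) = k) := by omega
    simp only [hne, if_false, solveTree]
    simp only [List.flatMap_subtype, List.unattach_attach]
    congr 1
    funext i
    congr 1
    funext j
    exact ih (i + 1) (comb ++ [(i, j)]) (by simp; omega)

@[simp] theorem chainToList_cons (c : PVChain) (i j : Int) :
    chainToList (PVChain.cons c i j) = chainToList c ++ [(i, j)] := by
  simp [chainToList, chainUnwind]

-- a state without room for m+1 more pairs contributes nothing
theorem solveTree_dead (n : Int) (m : Nat) (s : Int) (c : List (Int × Int))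
    (h : (n + 1 - s : Int) < (m + 1 : Int)) : solveTree n (m + 1) s c = [] := by
  induction m generalizing s c with
  | zero =>
    have : PySem.List.pyRange s (n + 1) 1 = [] :=
      PySem.List.pyRange_one_eq_nil (by omega)
    simp [solveTree, this]
  | succ m ih =>
    rw [solveTree, List.flatMap_eq_nil_iff]
    intro i hi
    rw [List.flatMap_eq_nil_iff]
    intro j hj
    have hmem := (PySem.List.mem_pyRange_one).1 hi
    exact ih (i + 1) (c ++ [(i, j)]) (by omega)

-- the last emission stage of Source B is solveTree 1
theorem solveTree_one (n : Int) (s : Int) (c : List (Int × Int)) :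
    solveTree n 1 s c =
      (PySem.List.pyRange s (n + 1) 1).flatMap (fun i =>
        (PySem.List.pyRange s (n + 1) 1).map (fun j => c ++ [(i, j)])) := by
  simp [solveTree, Eq.symm List.map_eq_flatMap]

-- B's pruned state loop, followed by one emission stage, computes solveTree (m+1)
theorem solveLoop_eq_tree (n : Int) (m : Nat) (states : List (Int × PVChain)) :
    (solveLoop n m states).flatMap (fun p => solveTree n 1 p.1 (chainToList p.2))
      = states.flatMap (fun p => solveTree n (m + 1) p.1 (chainToList p.2)) := by
  induction m generalizing states with
  | zero => rfl
  | succ m ih =>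
    by_cases hs : states = []
    · simp [solveLoop, hs]
    · rw [solveLoop, if_neg hs, ih, solveStep, List.flatMap_assoc]
      congr 1
      funext p
      rw [List.flatMap_assoc]
      simp only [List.flatMap_map, chainToList_cons]
      conv_rhs => rw [solveTree]
      -- a subtree rooted past n - m has no room for the remaining m+1 pairs
      have hdead : ∀ (L : List Int),
          (PySem.List.pyRange (n - (m : Int)) (n + 1) 1).flatMap (fun i =>
            L.flatMap (fun j =>
              solveTree n (m + 1) (i + 1) (chainToList p.2 ++ [(i, j)]))) = [] := by
        intro L
        rw [List.flatMap_eq_nil_iff]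
        intro i hi
        rw [List.flatMap_eq_nil_iff]
        intro j hj
        have hmem := (PySem.List.mem_pyRange_one).1 hi
        exact solveTree_dead n m (i + 1) _ (by omega)
      by_cases hle : p.1 ≤ n - (m : Int)
      · have hsplit : PySem.List.pyRange p.1 (n + 1) 1
            = PySem.List.pyRange p.1 (n - (m : Int)) 1
              ++ PySem.List.pyRange (n - (m : Int)) (n + 1) 1 :=
          PySem.List.pyRange_one_append p.1 (n - (m : Int)) (n + 1) hle (by omega)
        rw [hsplit, show n - ((m : Int) + 1) + 1 = n - (m : Int) from by omega]
        symm
        rw [List.flatMap_append, hdead, List.append_nil]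
      · rw [show n - ((m : Int) + 1) + 1 = n - (m : Int) from by omega,
            PySem.List.pyRange_one_eq_nil (show n - (m : Int) ≤ p.1 from by omega)]
        symm
        rw [List.flatMap_nil, List.flatMap_eq_nil_iff]
        intro i hi
        rw [List.flatMap_eq_nil_iff]
        intro j hj
        have hmem := (PySem.List.mem_pyRange_one).1 hi
        exact solveTree_dead n m (i + 1) _ (by omega)

-- ===== VERDICT (by name: the statement is the Claim_ definition above) =====
theorem solve_spec : Claim_equal_solve := by
  intro n k _ _
  unfold Spec_solve solve solve_alt
  by_cases hk : k < 0
  · simp only [hk, if_true]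
    exact solveDfs_eq_nil n k 1 [] (by simp; omega)
  · simp only [hk, if_false]
    by_cases hk0 : k = 0
    · subst hk0
      rw [solveDfs]
      simp
    · simp only [hk0, if_false]
      rw [solveDfs_eq_tree n k k.toNat 1 [] (by simp; omega)]
      symm
      simp only [← solveTree_one]
      rw [solveLoop_eq_tree]
      have hm : k.toNat - 1 + 1 = k.toNat := by omega
      rw [hm]
      simp [chainToList, chainUnwind]
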